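-- pv_equiv track=rewrite | github.com/betagouv/zam | repondeur/zam_repondeur/services/fetch/senat/amendements.py | _merge_badly_split_chunks
-- ===== SOURCE A (Python) =====
-- from typing import Iterable, List, Optional, Set, Tuple
--
-- def _merge_badly_split_chunks(chunks: Iterable[str]) -> Iterable[str]:
--     chunks = iter(chunks)
--     for chunk in chunks:
--         while chunk.startswith("<body>") and not chunk.rstrip().endswith("</body>"):
--             try:
--                 chunk += " " + next(chunks)
--             except StopIteration:
--                 break
--         yield chunk
-- ===== SOURCE B (Python) =====
-- def _merge_badly_split_chunks(chunks):
--     buffer = None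
--     for chunk in chunks:
--         if buffer is None:
--             if chunk.startswith("<body>") and not chunk.rstrip().endswith("</body>"):
--                 buffer = chunk
--             else:
--                 yield chunk
--         else:
--             buffer += " " + chunk
--             if buffer.rstrip().endswith("</body>"):
--                 yield buffer
--                 buffer = None
--     if buffer is not None:
--         yield buffer
-- ===== Notes on version B (the rewrite author's own statement) =====
-- stated objective: simpler
-- what changed: Replaced the nested for/while with an inner next()-pulling loop and StopIteration handling by a flat single pass over the chunks that keeps an explicit buffer variable (None = not merging), flushed at end of input.
import Mathlib
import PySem

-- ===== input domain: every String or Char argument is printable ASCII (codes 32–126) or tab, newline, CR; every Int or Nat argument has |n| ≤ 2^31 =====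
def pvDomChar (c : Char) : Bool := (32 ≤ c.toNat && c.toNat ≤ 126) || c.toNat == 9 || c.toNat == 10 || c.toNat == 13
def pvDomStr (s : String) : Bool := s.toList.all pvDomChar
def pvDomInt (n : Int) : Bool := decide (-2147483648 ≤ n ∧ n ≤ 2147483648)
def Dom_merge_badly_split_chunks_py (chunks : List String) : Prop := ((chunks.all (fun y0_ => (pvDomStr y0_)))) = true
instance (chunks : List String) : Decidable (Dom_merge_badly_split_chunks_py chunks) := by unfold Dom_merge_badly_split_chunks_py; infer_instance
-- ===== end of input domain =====

-- B replaces A's nested for/while with StopIteration handling by a flat single pass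
-- keeping an explicit Option buffer, flushed after the loop (objective: simpler).

-- ===== PORT A =====
-- inner `while` of A: keep pulling from the iterator (`rest`) while the merged chunk
-- starts with "<body>" and its rstrip does not end with "</body>"; StopIteration (rest = []) breaks.
def mergeA_inner : String → List String → String × List String
  | chunk, rest =>
    if PySem.Str.startswith chunk "<body>" &&
       !(PySem.Str.endswith (PySem.Str.rstrip chunk) "</body>") then
      match rest with
      | [] => (chunk, [])
      | c :: rs => mergeA_inner (chunk ++ " " ++ c) rs
    else (chunk, rest)

theorem mergeA_inner_rest_le : ∀ (rest : List String) (chunk : String),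
    (mergeA_inner chunk rest).2.length ≤ rest.length := by
  intro rest
  induction rest with
  | nil =>
    intro chunk
    rw [mergeA_inner.eq_def]
    split
    · simp
  | cons c rs ih =>
    intro chunk
    rw [mergeA_inner.eq_def]
    by_cases h : (PySem.Str.startswith chunk "<body>" &&
        !PySem.Str.endswith (PySem.Str.rstrip chunk) "</body>") = true
    · simp only [h, if_true]
      exact Nat.le_trans (ih (chunk ++ " " ++ c)) (Nat.le_succ rs.length)
    · simp only [Bool.not_eq_true] at h
      simp only [h, Bool.false_eq_true, if_false]
      exact Nat.le_refl _

-- outer `for chunk in chunks` of A: take a chunk, run the inner while, yield, continue on the rest.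
def merge_badly_split_chunks_py (chunks : List String) : List String :=
  match chunks with
  | [] => []
  | c :: rest =>
    let p := mergeA_inner c rest
    p.1 :: merge_badly_split_chunks_py p.2
termination_by chunks.length
decreasing_by
  simp only [List.length_cons]
  exact Nat.lt_succ_of_le (mergeA_inner_rest_le rest c)

-- ===== PORT B =====
-- B's flat loop: state = Option buffer; flush the buffer when the input ends.
def mergeB_go : Option String → List String → List String
  | none, [] => []
  | some buf, [] => [buf]
  | none, c :: rest =>
    if PySem.Str.startswith c "<body>" &&
       !(PySem.Str.endswith (PySem.Str.rstrip c) "</body>") then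
      mergeB_go (some c) rest
    else c :: mergeB_go none rest
  | some buf, c :: rest =>
    let buf' := buf ++ " " ++ c
    if PySem.Str.endswith (PySem.Str.rstrip buf') "</body>" then
      buf' :: mergeB_go none rest
    else mergeB_go (some buf') rest

def merge_badly_split_chunks_py_alt (chunks : List String) : List String :=
  mergeB_go none chunks

-- ===== PRECONDITION & SPEC =====
def Spec_merge_badly_split_chunks_py (chunks : List String) (out : List String) : Prop := out = merge_badly_split_chunks_py_alt chunks
instance (chunks : List String) (out : List String) : Decidable (Spec_merge_badly_split_chunks_py chunks out) := by unfold Spec_merge_badly_split_chunks_py; infer_instance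

-- ===== CLAIM (what is proved, stated in full; the proofs are below) =====
def Claim_equal_merge_badly_split_chunks_py : Prop := ∀ (chunks : List String), Dom_merge_badly_split_chunks_py chunks → Spec_merge_badly_split_chunks_py chunks (merge_badly_split_chunks_py chunks)

-- ===== LEMMAS AND PROOFS =====

theorem startswith_append (s t p : String)
    (h : PySem.Str.startswith s p = true) :
    PySem.Str.startswith (s ++ t) p = true := by
  simp only [PySem.Str.startswith_eq, PySem.Chars.startswith_iff] at *
  exact h.trans (by simp)

-- B's some-state run equals A's inner while followed by a yield, provided the buffer
-- satisfies A's while condition (it always does when the some-state is entered).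
theorem mergeB_some_eq (rest : List String) : ∀ (buf : String),
    PySem.Str.startswith buf "<body>" = true →
    PySem.Str.endswith (PySem.Str.rstrip buf) "</body>" = false →
    mergeB_go (some buf) rest =
      (mergeA_inner buf rest).1 :: mergeB_go none (mergeA_inner buf rest).2 := by
  induction rest with
  | nil =>
    intro buf h1 h2
    rw [mergeA_inner.eq_def]
    simp only [h1, h2, Bool.not_false, Bool.and_self, if_true]
    rfl
  | cons c rs ih =>
    intro buf h1 h2
    rw [mergeA_inner.eq_def]
    simp only [h1, h2, Bool.not_false, Bool.and_self, if_true]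
    rw [mergeB_go]
    by_cases hc : PySem.Str.endswith (PySem.Str.rstrip (buf ++ " " ++ c)) "</body>" = true
    · simp only [hc, if_true]
      rw [mergeA_inner.eq_def]
      simp only [hc, Bool.not_true, Bool.and_false, Bool.false_eq_true, if_false]
    · simp only [Bool.not_eq_true] at hc
      simp only [hc, Bool.false_eq_true, if_false]
      exact ih _ (startswith_append _ _ _ (startswith_append _ _ _ h1)) hc

theorem mergeA_eq_mergeB (chunks : List String) :
    merge_badly_split_chunks_py chunks = mergeB_go none chunks := by
  induction chunks using merge_badly_split_chunks_py.induct with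
  | case1 => rw [merge_badly_split_chunks_py]; rfl
  | case2 c rest p ih =>
    rw [merge_badly_split_chunks_py]
    have ih' : merge_badly_split_chunks_py (mergeA_inner c rest).2
        = mergeB_go none (mergeA_inner c rest).2 := ih
    by_cases h1 : PySem.Str.startswith c "<body>" = true
    · by_cases h2 : PySem.Str.endswith (PySem.Str.rstrip c) "</body>" = false
      · rw [mergeB_go]
        simp only [h1, h2, Bool.not_false, Bool.and_self, if_true]
        rw [mergeB_some_eq rest c h1 h2, ih']
      · simp only [Bool.not_eq_false] at h2
        have he : mergeA_inner c rest = (c, rest) := by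
          rw [mergeA_inner.eq_def]
          simp only [h1, h2, Bool.not_true, Bool.and_false, Bool.false_eq_true, if_false]
        rw [he] at ih' ⊢
        rw [mergeB_go]
        simp only [h1, h2, Bool.not_true, Bool.and_false, Bool.false_eq_true, if_false]
        rw [ih']
    · simp only [Bool.not_eq_true] at h1
      have he : mergeA_inner c rest = (c, rest) := by
        rw [mergeA_inner.eq_def]
        simp only [h1, Bool.false_and, Bool.false_eq_true, if_false]
      rw [he] at ih' ⊢
      rw [mergeB_go]
      simp only [h1, Bool.false_and, Bool.false_eq_true, if_false]
      rw [ih']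

-- ===== VERDICT (by name: the statement is the Claim_ definition above) =====
theorem merge_badly_split_chunks_py_spec : Claim_equal_merge_badly_split_chunks_py := by
  intro chunks _
  unfold Spec_merge_badly_split_chunks_py merge_badly_split_chunks_py_alt
  exact mergeA_eq_mergeB chunks
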